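-- pv_equiv track=rewrite | github.com/vigneshSr91/MyProjects | PairsWithGivenDifference.py | solve
-- ===== SOURCE A (Python) =====
-- def solve(A, B):
--     A.sort()
--     answer = 0
--
--     if B == 0:
--         return len(A) - len(set(A))
--
--     pair_hashmap = dict()
--     for i in range(len(A)):
--         remainder = A[i] + B
--         pair_hashmap[A[i]] = remainder
--
--     result_elements = dict()
--
--     for i in range(len(A)):
--         if pair_hashmap[A[i]] in pair_hashmap and A[i] not in result_elements:
--             answer += 1
--             result_elements[A[i]] = pair_hashmap[A[i]]
--     return answer
-- ===== SOURCE B (Python) =====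
-- def solve(A, B):
--     # NOTE: mutates A in place (A.sort()), same as the original.
--     A.sort()
--     if B == 0:
--         return len(A) - len(set(A))
--     u = sorted(set(A))          # distinct values, strictly increasing
--     v = [x + B for x in u]      # targets, also strictly increasing
--     i = j = 0
--     count = 0
--     while i < len(u) and j < len(v):
--         if u[i] < v[j]:
--             i += 1
--         elif v[j] < u[i]:
--             j += 1
--         else:
--             count += 1
--             i += 1
--             j += 1
--     return count
-- ===== Notes on version B (the rewrite author's own statement) =====
-- stated objective: alternative
-- what changed: For B != 0, instead of building a value->value+B hashmap plus a seen-dict and doing per-element membership lookups, B sorts the distinct values once and counts matches with a single two-pointer merge of u and [x+B for x in u]; the B == 0 branch (len(A) - len(set(A))) is kept verbatim.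
import Mathlib
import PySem

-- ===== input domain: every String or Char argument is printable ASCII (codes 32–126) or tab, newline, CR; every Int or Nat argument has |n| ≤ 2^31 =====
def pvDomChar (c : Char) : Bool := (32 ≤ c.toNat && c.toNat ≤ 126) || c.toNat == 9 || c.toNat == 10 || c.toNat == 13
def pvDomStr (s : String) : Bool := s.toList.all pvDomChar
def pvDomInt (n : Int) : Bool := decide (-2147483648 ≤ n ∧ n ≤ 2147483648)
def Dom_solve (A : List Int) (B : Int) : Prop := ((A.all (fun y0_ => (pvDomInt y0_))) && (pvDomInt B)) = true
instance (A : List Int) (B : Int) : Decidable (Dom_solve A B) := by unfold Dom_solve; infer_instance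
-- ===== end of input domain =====

-- B replaces A's per-element hash lookups by one two-pointer merge over the sorted distinct
-- values (objective: alternative). Both versions sort A in place; the equivalence proved here
-- is about the RETURN value (the in-place sort side effect is identical in both).


-- ===== PORT A =====
-- A's loops 'for i in range(len(A)): … A[i] …' read the sorted list left to right (every index
-- in range); they are ported as folds over the sorted list in the same order. 'pair_hashmap[A[i]]'
-- always finds its key (the first loop inserted every A[i]), so it is ported as getD.
def solve (A : List Int) (B : Int) : Int :=
  let s := PySem.List.sorted A (fun x => x) false          -- A.sort()
  if B = 0 then
    (s.length : Int) - ((PySem.Set.ofList s).length : Int) -- len(A) - len(set(A))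
  else
    let ph : PySem.Dict Int Int :=
      s.foldl (fun d x => d.insert x (x + B)) PySem.Dict.empty
    let st : Int × PySem.Dict Int Int :=
      s.foldl (fun p x =>
        if ph.contains (ph.getD x 0) && !(p.2.contains x) then
          (p.1 + 1, p.2.insert x (ph.getD x 0))
        else p) (0, PySem.Dict.empty)
    st.1

-- ===== PORT B =====
-- Source B's while-loop moves i and j only forward, consuming u and v from the left; it is ported
-- as this structural recursion on the two lists (count is the accumulator).
def interLoop : List Int → List Int → Int → Int
  | [], _, count => count
  | _ :: _, [], count => count
  | a :: as, b :: bs, count =>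
    if a < b then interLoop as (b :: bs) count
    else if b < a then interLoop (a :: as) bs count
    else interLoop as bs (count + 1)

def solve_alt (A : List Int) (B : Int) : Int :=
  let s := PySem.List.sorted A (fun x => x) false          -- A.sort()
  if B = 0 then
    (s.length : Int) - ((PySem.Set.ofList s).length : Int)
  else
    let u := PySem.List.sorted (PySem.Set.ofList s) (fun x => x) false  -- sorted(set(A))
    let v := u.map (fun x => x + B)                                     -- [x + B for x in u]
    interLoop u v 0

-- ===== PRECONDITION & SPEC =====
def Spec_solve (A : List Int) (B : Int) (out : Int) : Prop := out = solve_alt A B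
instance (A : List Int) (B : Int) (out : Int) : Decidable (Spec_solve A B out) := by unfold Spec_solve; infer_instance

-- ===== CLAIM (what is proved, stated in full; the proofs are below) =====
def Claim_equal_solve : Prop := ∀ (A : List Int) (B : Int), Dom_solve A B → Spec_solve A B (solve A B)

-- ===== LEMMAS AND PROOFS =====

-- The first dict loop: ph maps exactly the members of s, each to itself plus B.
theorem ph_get? (s : List Int) (B : Int) (d : PySem.Dict Int Int) (y : Int) :
    (s.foldl (fun d x => d.insert x (x + B)) d).get? y
      = if y ∈ s then some (y + B) else d.get? y := by
  induction s generalizing d with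
  | nil => simp
  | cons x t ih =>
    simp only [List.foldl_cons, ih, PySem.Dict.get?_insert, List.mem_cons]
    by_cases hyt : y ∈ t <;> by_cases hyx : y = x <;> simp [hyt, hyx]

-- Counting the common elements of two strictly increasing lists = membership count.
theorem interLoop_eq_countP (u v : List Int) (c : Int)
    (hu : u.Pairwise (· < ·)) (hv : v.Pairwise (· < ·)) :
    interLoop u v c = c + (v.countP (fun y => decide (y ∈ u)) : Int) := by
  induction u generalizing v c with
  | nil => induction v with
    | nil => simp [interLoop]
    | cons b bs _ => simp [interLoop]
  | cons a as ihu =>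
    induction v generalizing c with
    | nil => simp [interLoop]
    | cons b bs ihv =>
      have has : as.Pairwise (· < ·) := hu.of_cons
      have hbs : bs.Pairwise (· < ·) := hv.of_cons
      by_cases hab : a < b
      · -- every element of b :: bs exceeds a
        have hgt : ∀ y ∈ b :: bs, a < y := by
          intro y hy
          rcases List.mem_cons.mp hy with rfl | hy
          · exact hab
          · exact lt_trans hab (List.rel_of_pairwise_cons hv hy)
        have hcnt : (b :: bs).countP (fun y => decide (y ∈ a :: as))
            = (b :: bs).countP (fun y => decide (y ∈ as)) := by
          apply List.countP_congr
          intro y hy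
          have : y ≠ a := ne_of_gt (hgt y hy)
          simp [List.mem_cons, this]
        rw [interLoop, if_pos hab, ihu (b :: bs) c has hv, hcnt]
      · by_cases hba : b < a
        · -- b is smaller than everything in a :: as
          have hnb : ¬b = a ∧ b ∉ as := by
            constructor
            · exact fun e => absurd (e ▸ hba) (lt_irrefl b)
            · intro hb
              exact absurd (lt_trans hba (List.rel_of_pairwise_cons hu hb)) (lt_irrefl b)
          rw [interLoop, if_neg hab, if_pos hba, ihv c hbs]
          simp [hnb.1, hnb.2]
        · -- a = b
          have heq : a = b := le_antisymm (not_lt.mp hba) (not_lt.mp hab)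
          subst heq
          have hcnt : bs.countP (fun y => decide (y ∈ a :: as))
              = bs.countP (fun y => decide (y ∈ as)) := by
            apply List.countP_congr
            intro y hy
            have : y ≠ a := ne_of_gt (List.rel_of_pairwise_cons hv hy)
            simp [List.mem_cons, this]
          rw [interLoop, if_neg hab, if_neg hba, ihu bs (c + 1) has hbs,
              List.countP_cons, hcnt]
          simp only [List.mem_cons, true_or, decide_true, if_pos]
          push_cast
          ring

-- Removing one satisfying element from a Nodup list drops the filter length by one.
theorem filter_length_erase_one (l : List Int) (x : Int) (q : Int → Bool)
    (hnd : l.Nodup) (hx : x ∈ l) (hqx : q x = true) :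
    (l.filter q).length = (l.filter (fun y => q y && !(y == x))).length + 1 := by
  induction l with
  | nil => cases hx
  | cons h t ih =>
    rcases List.mem_cons.mp hx with rfl | hxt
    · have hnt : x ∉ t := (List.nodup_cons.mp hnd).1
      have hft : t.filter (fun y => q y && !(y == x)) = t.filter q := by
        apply List.filter_congr
        intro y hy
        have : y ≠ x := fun e => hnt (e ▸ hy)
        simp [this]
      simp [hqx, hft]
    · have hnd' : t.Nodup := (List.nodup_cons.mp hnd).2
      by_cases hqh : q h = true
      · by_cases hhx : h = x
        · exact absurd (hhx ▸ hxt) (List.nodup_cons.mp hnd).1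
        · simp [hqh, hhx, ih hnd' hxt]
      · simp [hqh, ih hnd' hxt]

-- The counting loop of A: the running answer counts the not-yet-seen x with x+B present.
theorem loop_count (s : List Int) (B : Int) :
    ∀ (t : List Int), (∀ x ∈ t, x ∈ s) → ∀ (c : Int) (r : PySem.Dict Int Int),
    (t.foldl (fun p x =>
        if (s.foldl (fun d x => d.insert x (x + B)) PySem.Dict.empty).contains
             ((s.foldl (fun d x => d.insert x (x + B)) PySem.Dict.empty).getD x 0)
           && !(p.2.contains x) then
          (p.1 + 1, p.2.insert x ((s.foldl (fun d x => d.insert x (x + B)) PySem.Dict.empty).getD x 0))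
        else p) (c, r)).1
      = c + ((t.dedup.filter
          (fun y => decide ((y + B) ∈ s) && !(r.contains y))).length : Int) := by
  intro t
  induction t with
  | nil => simp
  | cons x t' ih =>
    intro ht c r
    have hxs : x ∈ s := ht x (List.mem_cons_self)
    have ht' : ∀ y ∈ t', y ∈ s := fun y hy => ht y (List.mem_cons_of_mem x hy)
    have hget : (s.foldl (fun d x => d.insert x (x + B)) PySem.Dict.empty).getD x 0 = x + B := by
      rw [PySem.Dict.getD_eq_get?_getD, ph_get? s B PySem.Dict.empty x, if_pos hxs]
      rfl
    have hcont : ∀ z : Int,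
        (s.foldl (fun d x => d.insert x (x + B)) PySem.Dict.empty).contains z
          = decide (z ∈ s) := by
      intro z
      rw [PySem.Dict.contains_eq_isSome_get?, ph_get? s B PySem.Dict.empty z]
      by_cases hz : z ∈ s <;> simp [hz, PySem.Dict.get?_empty]
    rw [List.foldl_cons, hget, hcont]
    by_cases hcond : (decide ((x + B) ∈ s) && !(r.contains x)) = true
    · rw [if_pos hcond, ih ht' (c + 1) (r.insert x (x + B))]
      have hpred : ∀ y, ((r.insert x (x + B)).contains y) = ((y == x) || r.contains y) :=
        fun y => PySem.Dict.contains_insert r x y (x + B)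
      have hq : (t'.dedup.filter (fun y => decide ((y + B) ∈ s) && !((r.insert x (x+B)).contains y)))
          = (t'.dedup.filter (fun y => (decide ((y + B) ∈ s) && !(r.contains y)) && !(y == x))) := by
        apply List.filter_congr
        intro y _
        rw [hpred y]
        by_cases hyx : y = x <;> simp [hyx, Bool.and_comm, Bool.and_left_comm]
      rw [hq]
      by_cases hxt : x ∈ t'
      · rw [List.dedup_cons_of_mem hxt]
        have := filter_length_erase_one t'.dedup x
          (fun y => decide ((y + B) ∈ s) && !(r.contains y)) (List.nodup_dedup t')
          (List.mem_dedup.mpr hxt) hcond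
        simp only [] at this
        rw [this]
        push_cast
        ring
      · rw [List.dedup_cons_of_notMem hxt, List.filter_cons, if_pos hcond]
        have : (t'.dedup.filter (fun y => (decide ((y + B) ∈ s) && !(r.contains y)) && !(y == x)))
            = (t'.dedup.filter (fun y => decide ((y + B) ∈ s) && !(r.contains y))) := by
          apply List.filter_congr
          intro y hy
          have : y ≠ x := fun e => hxt (e ▸ List.mem_dedup.mp hy)
          simp [this]
        rw [this, List.length_cons]
        push_cast
        ring
    · rw [if_neg hcond, ih ht' c r]
      by_cases hxt : x ∈ t'
      · rw [List.dedup_cons_of_mem hxt]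
      · rw [List.dedup_cons_of_notMem hxt, List.filter_cons,
            if_neg hcond]

-- ===== VERDICT (by name: the statement is the Claim_ definition above) =====
theorem solve_spec : Claim_equal_solve := by
  intro A B _
  unfold Spec_solve solve solve_alt
  by_cases hB : B = 0
  · simp [hB]
  · rw [if_neg hB, if_neg hB]
    set s := PySem.List.sorted A (fun x => x) false with hs
    set u := PySem.List.sorted (PySem.Set.ofList s) (fun x => x) false with hu
    -- B side
    have hupw : u.Pairwise (· < ·) := PySem.List.sorted_ofList_pairwise_lt s
    have hvpw : (u.map (fun x => x + B)).Pairwise (· < ·) := by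
      rw [List.pairwise_map]
      exact hupw.imp (by intro a b h; omega)
    have hB' : interLoop u (u.map (fun x => x + B)) 0
        = ((u.map (fun x => x + B)).countP (fun y => decide (y ∈ u)) : Int) := by
      rw [interLoop_eq_countP u _ 0 hupw hvpw]; ring
    -- memberships agree
    have humem : ∀ z : Int, z ∈ u ↔ z ∈ s := by
      intro z
      rw [hu, PySem.List.mem_sorted, PySem.Set.mem_ofList]
    -- A side
    have hA := loop_count s B s (fun x hx => hx) 0 PySem.Dict.empty
    simp only [zero_add] at hA
    rw [hA]
    have hremp : (s.dedup.filter (fun y => decide ((y + B) ∈ s) && !((PySem.Dict.empty : PySem.Dict Int Int).contains y)))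
        = (s.dedup.filter (fun y => decide ((y + B) ∈ s))) := by
      apply List.filter_congr
      intro y _
      simp [PySem.Dict.contains_empty]
    rw [hremp, hB', List.countP_map]
    have hpred : (fun x => decide ((x + B) ∈ u)) = (fun x => decide ((x + B) ∈ s)) := by
      funext x
      simp [humem]
    show ((s.dedup.filter (fun y => decide ((y + B) ∈ s))).length : Int)
        = (u.countP ((fun y => decide (y ∈ u)) ∘ (fun x => x + B)) : Int)
    have : (u.countP ((fun y => decide (y ∈ u)) ∘ (fun x => x + B)))
        = (u.filter (fun x => decide ((x + B) ∈ s))).length := by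
      rw [← List.countP_eq_length_filter]
      apply List.countP_congr
      intro x _
      simp [humem]
    rw [this]
    -- s.dedup and u are Nodup lists with the same members, hence a permutation
    have hund : u.Nodup := ((PySem.List.sorted_perm _ _ _).nodup_iff).mpr (PySem.Set.nodup_ofList s)
    have hperm : s.dedup.Perm u := by
      rw [List.perm_ext_iff_of_nodup (List.nodup_dedup s) hund]
      intro z
      rw [humem z, List.mem_dedup]
    exact congrArg _ ((hperm.filter _).length_eq)
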